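-- pv_equiv track=rewrite | github.com/jlab/ADP_collection | satisfiability.py | satisfiability
-- ===== SOURCE A (Python) =====
-- import itertools
--
-- def _is_literal_satisfied(assignment, literal):
--     """Tests if a single literal is satisfied by the given assignment."""
--     if literal == 'P':
--         return assignment
--     elif literal == 'N':
--         return (not assignment)
--     else:
--         return False
--
-- def _is_clause_satisfied(assignment, clause):
--     """Tests if the whole clause is satisfied by the given assignment.
--        Note: literals are concatenated via OR
--     """
--     return any(map(lambda x: _is_literal_satisfied(*x), zip(assignment, clause)))
--
-- def satisfiability(formula):
--     """Tests if a formula can be satisfied.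
--        If so, return according assignments.
--     """
--     clauses = formula.split('&')
--     assert len(set(map(len, clauses))) == 1, "clauses have different lengths!"
--
--     sat_assignments = []
--     for assignment in itertools.product([True, False], repeat=len(clauses[0])):
--         satisfied = all(map(lambda x: _is_clause_satisfied(assignment, x), clauses))
--         if satisfied:
--             sat_assignments.append(assignment)
--
--     return sat_assignments
-- ===== SOURCE B (Python) =====
-- def satisfiability(formula):
--     """Tests if a formula can be satisfied.
--        If so, return according assignments.
--     """
--     clauses = formula.split('&')
--     assert len(set(map(len, clauses))) == 1, "clauses have different lengths!"
--     n = len(clauses[0])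
--     out = []
--
--     def dfs(i, rem, prefix):
--         # prune: a clause with no remaining 'P'/'N' literal can never be satisfied
--         if any(('P' not in c) and ('N' not in c) for c in rem):
--             return
--         if i == n:
--             out.append(tuple(prefix))
--             return
--         for v in (True, False):
--             dfs(i + 1,
--                 [c[1:] for c in rem if c[0] != ('P' if v else 'N')],
--                 prefix + [v])
--
--     dfs(0, list(clauses), [])
--     return out
-- ===== Notes on version B (the rewrite author's own statement) =====
-- stated objective: faster
-- what changed: Replaced the flat itertools.product enumeration over all 2^n assignments with a True-first recursive DFS over variable positions that abandons a branch as soon as some clause has no undecided literal position left and is thus unsatisfiable, emitting the same assignments in the same lexicographic order.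
import Mathlib
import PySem

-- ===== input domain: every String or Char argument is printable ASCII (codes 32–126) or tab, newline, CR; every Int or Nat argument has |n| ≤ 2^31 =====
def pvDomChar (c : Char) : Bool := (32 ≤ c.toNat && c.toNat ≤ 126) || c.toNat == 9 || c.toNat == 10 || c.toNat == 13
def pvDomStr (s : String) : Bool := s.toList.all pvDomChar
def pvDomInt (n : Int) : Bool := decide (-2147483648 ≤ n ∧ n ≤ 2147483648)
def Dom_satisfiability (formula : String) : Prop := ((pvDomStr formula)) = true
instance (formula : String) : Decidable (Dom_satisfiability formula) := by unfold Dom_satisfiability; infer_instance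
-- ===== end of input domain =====

-- B replaces A's flat product-of-all-assignments enumeration by a True-first DFS over the
-- variable positions that prunes branches in which some clause can no longer be satisfied
-- (objective: faster on typical inputs via pruning; same output list in the same order).

-- ===== PORT A =====
def litSat (assignment : Bool) (literal : Char) : Bool :=
  if literal = 'P' then assignment
  else if literal = 'N' then !assignment
  else false

def clauseSat (assignment : List Bool) (clause : List Char) : Bool :=
  (assignment.zip clause).any (fun x => litSat x.1 x.2)

-- itertools.product([True, False], repeat=n), lexicographic with True first
def prodTF : Nat → List (List Bool)
  | 0 => [[]]
  | n + 1 => (prodTF n).map (fun r => true :: r) ++ (prodTF n).map (fun r => false :: r)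

def satisfiability (formula : String) : List (List Bool) :=
  let clauses := PySem.Chars.splitOn formula.toList "&".toList
  (prodTF (clauses.headD []).length).foldl
    (fun acc a => if clauses.all (fun c => clauseSat a c) then acc ++ [a] else acc) []

-- ===== PORT B =====
-- prune test: some remaining clause suffix has no 'P' and no 'N' literal left
def deadB (rem : List (List Char)) : Bool :=
  rem.any (fun c => !(c.contains 'P') && !(c.contains 'N'))

-- one DFS step: drop the clauses satisfied by choosing value v at the current position,
-- advance the others past it (Python's [c[1:] for c in rem if c[0] != ('P' if v else 'N')])
def stepB (rem : List (List Char)) (v : Bool) : List (List Char) :=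
  (rem.filter (fun c => c.headD ' ' ≠ (if v then 'P' else 'N'))).map List.tail

def dfsB (n i : Nat) (rem : List (List Char)) (pre : List Bool) : List (List Bool) :=
  if deadB rem then []
  else if i = n then [pre]
  else if _h : i < n then
    dfsB n (i + 1) (stepB rem true) (pre ++ [true]) ++
    dfsB n (i + 1) (stepB rem false) (pre ++ [false])
  else []  -- unreachable (i ≤ n always); totality guard only
termination_by n - i

def satisfiability_alt (formula : String) : List (List Bool) :=
  let clauses := PySem.Chars.splitOn formula.toList "&".toList
  dfsB (clauses.headD []).length 0 clauses []

-- ===== PRECONDITION & SPEC =====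
-- Pre_ excludes exactly the inputs on which A's assert fails (clauses of different lengths,
-- AssertionError); A returns on every other input.
def Pre_satisfiability (formula : String) : Prop :=
  ∀ c ∈ PySem.Chars.splitOn formula.toList "&".toList,
    c.length = ((PySem.Chars.splitOn formula.toList "&".toList).headD []).length
instance (formula : String) : Decidable (Pre_satisfiability formula) := by
  unfold Pre_satisfiability; infer_instance

def pvWitness_satisfiability : String := "PN&NP"

def Spec_satisfiability (formula : String) (out : List (List Bool)) : Prop := out = satisfiability_alt formula
instance (formula : String) (out : List (List Bool)) : Decidable (Spec_satisfiability formula out) := by unfold Spec_satisfiability; infer_instance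

-- ===== CLAIM (what is proved, stated in full; the proofs are below) =====
def Claim_equal_satisfiability : Prop := ∀ (formula : String), Dom_satisfiability formula → Pre_satisfiability formula → Spec_satisfiability formula (satisfiability formula)

-- ===== LEMMAS AND PROOFS =====

-- litSat as an equality test
lemma litSat_eq (v : Bool) (ch : Char) :
    litSat v ch = decide (ch = if v then 'P' else 'N') := by
  cases v with
  | false =>
    by_cases h1 : ch = 'P'
    · subst h1; simp [litSat]
    · by_cases h2 : ch = 'N'
      · subst h2; simp [litSat]
      · simp [litSat, h1, h2]
  | true =>
    by_cases h1 : ch = 'P'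
    · subst h1; simp [litSat]
    · by_cases h2 : ch = 'N'
      · subst h2; simp [litSat]
      · simp [litSat, h1, h2]

-- a clause with no 'P'/'N' literal is never satisfied
lemma clauseSat_of_dead (a : List Bool) (c : List Char)
    (hP : c.contains 'P' = false) (hN : c.contains 'N' = false) :
    clauseSat a c = false := by
  induction a generalizing c with
  | nil => simp [clauseSat]
  | cons v a ih =>
    cases c with
    | nil => simp [clauseSat]
    | cons ch c' =>
      simp only [List.contains_cons, Bool.or_eq_false_iff, beq_eq_false_iff_ne] at hP hN
      have hrec := ih c' hP.2 hN.2
      have hlit : litSat v ch = false := by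
        rw [litSat_eq]; cases v <;> simp [Ne.symm hP.1, Ne.symm hN.1]
      simp only [clauseSat, List.zip_cons_cons, List.any_cons] at hrec ⊢
      rw [hlit, hrec]; rfl

-- choosing value v at the head position: remaining satisfaction factors through stepB
lemma all_sat_cons (rem : List (List Char)) (k : Nat) (v : Bool) (a : List Bool)
    (hlen : ∀ c ∈ rem, c.length = k + 1) :
    rem.all (fun c => clauseSat (v :: a) c) = (stepB rem v).all (fun c => clauseSat a c) := by
  induction rem with
  | nil => simp [stepB]
  | cons c rem ih =>
    have hc := hlen c (by simp)
    cases c with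
    | nil => simp at hc
    | cons ch c' =>
      have hrest := ih (fun c hc => hlen c (by simp [hc]))
      have hhead : clauseSat (v :: a) (ch :: c') =
          (decide (ch = (if v then 'P' else 'N')) || clauseSat a c') := by
        simp [clauseSat, litSat_eq]
      by_cases hch : ch = (if v then 'P' else 'N')
      · have hstep : stepB ((ch :: c') :: rem) v = stepB rem v := by simp [stepB, hch]
        rw [List.all_cons, hhead, hstep, hrest]; simp [hch]
      · have hstep : stepB ((ch :: c') :: rem) v = c' :: stepB rem v := by simp [stepB, hch]
        rw [List.all_cons, hhead, hstep, List.all_cons, hrest]; simp [hch, clauseSat]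

lemma length_stepB (rem : List (List Char)) (v : Bool) (k : Nat)
    (hlen : ∀ c ∈ rem, c.length = k + 1) :
    ∀ c ∈ stepB rem v, c.length = k := by
  intro c hc
  simp only [stepB, List.mem_map] at hc
  obtain ⟨c', hc', rfl⟩ := hc
  have := hlen c' (List.mem_of_mem_filter hc')
  simp [List.length_tail, this]

-- pushing one fixed leading value through the filtered enumeration
lemma filter_map_cons (L : List (List Bool)) (v : Bool) (pre : List Bool)
    (P Q : List Bool → Bool) (h : ∀ a, P (v :: a) = Q a) :
    ((L.map (fun r => v :: r)).filter P).map (fun a => pre ++ a) =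
      (L.filter Q).map (fun a => (pre ++ [v]) ++ a) := by
  induction L with
  | nil => rfl
  | cons a L ih =>
    simp only [List.map_cons, List.filter_cons, h]
    by_cases hq : Q a = true <;> simp [hq, ih]

-- if some clause is dead, no assignment satisfies all clauses
lemma all_sat_of_dead (rem : List (List Char)) (hd : deadB rem = true) :
    ∀ a : List Bool, rem.all (fun c => clauseSat a c) = false := by
  intro a
  obtain ⟨c, hc, hcd⟩ := List.any_eq_true.mp hd
  simp only [Bool.and_eq_true, Bool.not_eq_true'] at hcd
  exact List.all_eq_false.mpr ⟨c, hc, by simp [clauseSat_of_dead a c hcd.1 hcd.2]⟩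

-- the DFS equals the filtered product enumeration
lemma dfsB_eq (k : Nat) : ∀ (n i : Nat) (rem : List (List Char)) (pre : List Bool),
    n - i = k → i ≤ n → (∀ c ∈ rem, c.length = k) →
    dfsB n i rem pre =
      ((prodTF k).filter (fun a => rem.all (fun c => clauseSat a c))).map (fun a => pre ++ a) := by
  induction k with
  | zero =>
    intro n i rem pre hk hi hlen
    have hin : i = n := by omega
    by_cases hd : deadB rem = true
    · rw [dfsB, if_pos hd]
      simp [prodTF, all_sat_of_dead rem hd]
    · rw [dfsB, if_neg hd, if_pos hin]
      -- not dead and all clauses empty ⇒ rem = []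
      have hrem : rem = [] := by
        cases rem with
        | nil => rfl
        | cons c rem =>
          exfalso
          have : c = [] := List.length_eq_zero_iff.mp (hlen c (by simp))
          subst this
          simp [deadB] at hd
      subst hrem
      simp [prodTF, clauseSat]
  | succ k ih =>
    intro n i rem pre hk hi hlen
    by_cases hd : deadB rem = true
    · rw [dfsB, if_pos hd]
      simp [all_sat_of_dead rem hd]
    · have hlt : i < n := by omega
      rw [dfsB, if_neg hd, if_neg (by omega : ¬ i = n), dif_pos hlt]
      rw [ih n (i + 1) (stepB rem true) (pre ++ [true]) (by omega) (by omega)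
            (length_stepB rem true k hlen),
          ih n (i + 1) (stepB rem false) (pre ++ [false]) (by omega) (by omega)
            (length_stepB rem false k hlen)]
      rw [show prodTF (k + 1) =
            (prodTF k).map (fun r => true :: r) ++ (prodTF k).map (fun r => false :: r) from rfl]
      rw [List.filter_append, List.map_append]
      congr 1
      · exact (filter_map_cons (prodTF k) true pre _ _
          (fun a => all_sat_cons rem k true a hlen)).symm
      · exact (filter_map_cons (prodTF k) false pre _ _
          (fun a => all_sat_cons rem k false a hlen)).symm

-- ===== VERDICT (by name: the statement is the Claim_ definition above) =====
theorem satisfiability_spec : Claim_equal_satisfiability := by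
  intro formula _ hpre
  unfold Spec_satisfiability satisfiability satisfiability_alt
  dsimp only
  rw [dfsB_eq (((PySem.Chars.splitOn formula.toList "&".toList).headD []).length) _ 0 _ []
        (by omega) (by omega) (fun c hc => hpre c hc)]
  simp only [PySem.List.foldl_append_if]
  simp
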